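-- pv_equiv track=rewrite | github.com/jbarillaro-vt/tormach-pcnc1100 | operator/v2.3.6/python/netconfig/nmcliparse.py | parse_output_line
-- ===== SOURCE A (Python) =====
-- def parse_output_line(line):
--     tokenlist = []
--     starttokenix = 0
--     scanix = 0
--     endix = 0
--     while len(line) > 0 and endix != -1:
--         endix = line.find(":", scanix)
--         if endix == -1:
--             # this is the final token - take the rest of the remaining line
--             tokenlist.append(line[starttokenix:])
--
--         else:
--             # either we have a valid empty token or we have a normal token with a colon delimiter that is not escaped
--             if endix == scanix or line[endix-1] != '\\':
--                 tokenlist.append(line[starttokenix:endix])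
--                 starttokenix = endix + 1
--
--             scanix = endix + 1
--
--     # now that we have discrete tokens, pass through each token and replace any \: match with just a :
--     for (ix, token) in enumerate(tokenlist):
--         tokenlist[ix] = token.replace("\:", ":")
--
--     return tokenlist
-- ===== SOURCE B (Python) =====
-- import re
--
-- def parse_output_line(line):
--     if not line:
--         return []
--     return [t.replace("\\:", ":") for t in re.split(r"(?<!\\):", line)]
-- ===== Notes on version B (the rewrite author's own statement) =====
-- stated objective: idiomatic
-- what changed: Replaces A's manual while-loop over find() indices (scanix/starttokenix/endix bookkeeping) with a single regex split on colons not preceded by a backslash, plus a comprehension for the unescaping; an empty line naturally yields [].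
import Mathlib
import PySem

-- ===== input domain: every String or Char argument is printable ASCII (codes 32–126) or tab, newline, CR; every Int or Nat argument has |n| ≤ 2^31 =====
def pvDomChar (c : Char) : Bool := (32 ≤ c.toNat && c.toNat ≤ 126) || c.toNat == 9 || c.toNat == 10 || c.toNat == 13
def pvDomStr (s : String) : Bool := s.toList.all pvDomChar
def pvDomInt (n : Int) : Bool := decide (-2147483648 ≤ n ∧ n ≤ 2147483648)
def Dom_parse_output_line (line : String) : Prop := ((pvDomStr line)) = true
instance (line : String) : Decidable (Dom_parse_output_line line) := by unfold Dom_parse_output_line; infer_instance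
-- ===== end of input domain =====

-- B replaces A's manual find/scan index loop with a regex split on unescaped colons (idiomatic; same cost).

-- ===== PORT A =====
-- line.find(":", scanix)
def pvFindA (l : List Char) (scan : Nat) : Int := PySem.Chars.findFrom l [':'] (scan : Int) none

-- termination helper for the while loop: a found colon lies in [scan, len)
theorem pvFindA_bounds (l : List Char) (scan : Nat) (h : pvFindA l scan ≠ -1) :
    scan ≤ (pvFindA l scan).toNat ∧ (pvFindA l scan).toNat < l.length := by
  rcases le_or_gt scan l.length with hle | hgt
  · obtain ⟨h1, h2, -⟩ := PySem.Chars.findFrom_natCast_spec l [':'] scan hle h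
    rw [show PySem.Chars.findFrom l [':'] (scan : Int) none = pvFindA l scan from rfl] at h1 h2
    have hnn : (0 : Int) ≤ pvFindA l scan := le_trans (by positivity) h1
    have hlen : (pvFindA l scan).toNat < l.length := by
      by_contra hc
      rw [List.drop_eq_nil_of_le (by omega)] at h2
      simp at h2
    exact ⟨by omega, hlen⟩
  · exfalso
    apply h
    have hlt : ((l.length : Int)) < (scan : Int) := by exact_mod_cast hgt
    simp only [pvFindA, PySem.Chars.findFrom]
    split_ifs <;> omega

-- the while loop of A: tokenlist is built head-first by the recursion
def pvLoopA (l : List Char) (start scan : Nat) : List (List Char) :=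
  let e := pvFindA l scan
  if he : e = -1 then
    [PySem.Chars.slice l (some (start : Int)) none]
  else
    if e = (scan : Int) || PySem.List.pyGet? l (e - 1) != some '\\' then
      PySem.Chars.slice l (some (start : Int)) (some e) :: pvLoopA l (e.toNat + 1) (e.toNat + 1)
    else
      pvLoopA l start (e.toNat + 1)
termination_by l.length + 1 - scan
decreasing_by
  all_goals have := pvFindA_bounds l scan he; omega

def parse_output_line (line : String) : List String :=
  let toks := if line.toList.length > 0 then pvLoopA line.toList 0 0 else []
  toks.map (fun t => String.ofList (PySem.Chars.replace t ['\\', ':'] [':']))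

-- ===== PORT B =====
-- re.split(r"(?<!\\):", line), ported by hand as a left-to-right scan that splits at each
-- ':' whose preceding character is not '\\' (exact for this pattern); prev = previous char.
def pvConsHd (c : Char) : List (List Char) → List (List Char)
  | [] => [[c]]
  | t :: ts => (c :: t) :: ts

def pvReSplit (prev : Option Char) : List Char → List (List Char)
  | [] => [[]]
  | c :: rest =>
    if c = ':' && prev != some '\\' then [] :: pvReSplit (some c) rest
    else pvConsHd c (pvReSplit (some c) rest)

def parse_output_line_alt (line : String) : List String :=
  if line = "" then []
  else (pvReSplit none line.toList).map (fun t => String.ofList (PySem.Chars.replace t ['\\', ':'] [':']))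

-- ===== PRECONDITION & SPEC =====
def Spec_parse_output_line (line : String) (out : List String) : Prop := out = parse_output_line_alt line
instance (line : String) (out : List String) : Decidable (Spec_parse_output_line line out) := by unfold Spec_parse_output_line; infer_instance

-- ===== CLAIM (what is proved, stated in full; the proofs are below) =====
def Claim_equal_parse_output_line : Prop := ∀ (line : String), Dom_parse_output_line line → Spec_parse_output_line line (parse_output_line line)

-- ===== LEMMAS AND PROOFS =====

def pvHeadMap (f : List Char → List Char) : List (List Char) → List (List Char)
  | [] => []
  | t :: ts => f t :: ts

theorem pvReSplit_ne_nil (prev : Option Char) (l : List Char) : pvReSplit prev l ≠ [] := by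
  cases l with
  | nil => simp [pvReSplit]
  | cons c rest =>
    simp only [pvReSplit]
    split
    · simp
    · cases pvReSplit (some c) rest <;> simp [pvConsHd]

theorem pvConsHd_eq_headMap (c : Char) (x : List (List Char)) (hx : x ≠ []) :
    pvConsHd c x = pvHeadMap (fun t => c :: t) x := by
  cases x with
  | nil => exact absurd rfl hx
  | cons t ts => rfl

theorem pvHeadMap_headMap (f g : List Char → List Char) (x : List (List Char)) :
    pvHeadMap f (pvHeadMap g x) = pvHeadMap (fun t => f (g t)) x := by
  cases x <;> rfl

theorem pvReSplit_no_colon (prev : Option Char) (l : List Char) (h : ':' ∉ l) :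
    pvReSplit prev l = [l] := by
  induction l generalizing prev with
  | nil => rfl
  | cons c rest ih =>
    have hc : c ≠ ':' := fun hc => h (hc ▸ List.mem_cons_self ..)
    have hcond : (decide (c = ':') && (prev != some '\\')) = false := by simp [hc]
    simp only [pvReSplit, hcond, if_neg (Bool.false_ne_true)]
    rw [ih (some c) (fun hm => h (List.mem_cons_of_mem _ hm))]
    rfl

theorem pvReSplit_append (p q : List Char) (prev : Option Char) (hp : ':' ∉ p) :
    pvReSplit prev (p ++ q) = pvHeadMap (fun t => p ++ t) (pvReSplit (p.getLast?.or prev) q) := by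
  induction p generalizing prev with
  | nil =>
    cases h : pvReSplit prev q with
    | nil => exact absurd h (pvReSplit_ne_nil _ _)
    | cons t ts => simp [pvHeadMap, h]
  | cons c p' ih =>
    have hc : c ≠ ':' := fun hc => hp (hc ▸ List.mem_cons_self ..)
    have hcond : (decide (c = ':') && (prev != some '\\')) = false := by simp [hc]
    simp only [List.cons_append, pvReSplit, hcond, if_neg (Bool.false_ne_true)]
    rw [pvConsHd_eq_headMap _ _ (pvReSplit_ne_nil _ _),
        ih (some c) (fun hm => hp (List.mem_cons_of_mem _ hm)),
        pvHeadMap_headMap]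
    congr 1
    cases p' with
    | nil => simp
    | cons d p'' =>
      have hgl : (d :: p'').getLast? = some ((d :: p'').getLast (by simp)) :=
        List.getLast?_eq_getLast _
      simp [hgl]

-- single-character prefix/infix characterisations
theorem pvPrefix_single (c : Char) (x : List Char) : [c] <+: x ↔ x.head? = some c := by
  cases x with
  | nil => simp
  | cons d t => simp [List.cons_prefix_cons, eq_comm]

theorem pvInfix_single (c : Char) (x : List Char) : [c] <:+: x ↔ c ∈ x := by
  constructor
  · intro h; exact h.mem (List.mem_singleton_self c)
  · intro h
    obtain ⟨s, t, rfl⟩ := List.append_of_mem h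
    exact ⟨s, t, by simp⟩

theorem pvFindA_neg_iff (l : List Char) (scan : Nat) (h : scan ≤ l.length) :
    pvFindA l scan = -1 ↔ ':' ∉ l.drop scan := by
  rw [pvFindA, PySem.Chars.findFrom_natCast_eq_neg_one_iff l [':'] scan h, pvInfix_single]

theorem pvTake_append_drop_of_le (l : List Char) (a b : Nat) (h : a ≤ b) :
    (l.drop a).take (b - a) ++ l.drop b = l.drop a := by
  have : l.drop b = (l.drop a).drop (b - a) := by
    rw [List.drop_drop]; congr 1; omega
  rw [this, List.take_append_drop]

theorem pvSlice_glue (l : List Char) (a b c : Nat) (hab : a ≤ b) (hbc : b ≤ c) :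
    (l.drop a).take (b - a) ++ (l.drop b).take (c - b) = (l.drop a).take (c - a) := by
  have h1 : (l.drop b) = (l.drop a).drop (b - a) := by
    rw [List.drop_drop]; congr 1; omega
  rw [h1, ← List.take_add, show b - a + (c - b) = c - a by omega]

theorem pvHeadMap_id (x : List (List Char)) : pvHeadMap (fun t => t) x = x := by
  cases x <;> simp [pvHeadMap]

theorem pvHeadMap_congr (f g : List Char → List Char) (x : List (List Char))
    (h : ∀ t, f t = g t) : pvHeadMap f x = pvHeadMap g x := by
  cases x <;> simp [pvHeadMap, h]

-- MAIN bridge: A's loop over indices equals B's scan over the suffix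
theorem pvMain (l : List Char) :
    ∀ n scan start prev, l.length - scan = n → scan ≤ l.length → start ≤ scan →
      prev ≠ some '\\' →
      pvLoopA l start scan =
        pvHeadMap (fun t => (l.drop start).take (scan - start) ++ t)
          (pvReSplit prev (l.drop scan)) := by
  intro n
  induction n using Nat.strong_induction_on with
  | _ n IH =>
  intro scan start prev hn hscan hstart hprev
  by_cases he : pvFindA l scan = -1
  · -- no colon left: one final token
    have hnc : ':' ∉ l.drop scan := (pvFindA_neg_iff l scan hscan).mp he
    rw [pvLoopA]
    rw [dif_pos he]
    rw [pvReSplit_no_colon prev _ hnc]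
    simp only [pvHeadMap]
    rw [pvTake_append_drop_of_le l start scan hstart]
    simp [PySem.Chars.slice_eq_listSlice, PySem.List.slice_from_natCast]
  · -- a colon was found at index j
    obtain ⟨hj1, hj2⟩ := pvFindA_bounds l scan he
    obtain ⟨h1, h2, h3⟩ := PySem.Chars.findFrom_natCast_spec l [':'] scan hscan he
    rw [show PySem.Chars.findFrom l [':'] (scan : Int) none = pvFindA l scan from rfl] at h1 h2 h3
    set j := (pvFindA l scan).toNat with hjdef
    have heint : pvFindA l scan = (j : Int) := by omega
    have hcol : l[j]? = some ':' := by
      rw [← List.head?_drop]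
      exact ((pvPrefix_single ':' _).mp h2)
    have hcolget : l[j]'hj2 = ':' := by
      have := List.getElem?_eq_getElem (l := l) (i := j) hj2
      rw [hcol] at this; exact (Option.some.inj this).symm
    have hnocol : ∀ i, scan ≤ i → i < j → l[i]? ≠ some ':' := by
      intro i hi1 hi2 hbad
      apply h3 i hi1 hi2
      rw [pvPrefix_single, List.head?_drop]
      exact hbad
    -- the colon-free segment p = l[scan:j]
    set p := (l.drop scan).take (j - scan) with hpdef
    have hpfree : ':' ∉ p := by
      intro hm
      obtain ⟨k, hk, hkval⟩ := List.getElem_of_mem hm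
      have hklt : k < j - scan := by
        have := hk; simp [hpdef] at this; omega
      have : p[k]'hk = l[scan + k]'(by omega) := by
        simp [hpdef, List.getElem_take, List.getElem_drop]
      apply hnocol (scan + k) (by omega) (by omega)
      rw [List.getElem?_eq_getElem (by omega : scan + k < l.length), ← this, hkval]
    have hdecomp : l.drop scan = p ++ ':' :: l.drop (j + 1) := by
      rw [hpdef]
      have h4 : l.drop j = ':' :: l.drop (j + 1) := by
        rw [List.drop_eq_getElem_cons hj2, hcolget]
      rw [← h4, pvTake_append_drop_of_le l scan j hj1]
    have hIH : ∀ start', start' ≤ j + 1 →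
        pvLoopA l start' (j + 1) =
          pvHeadMap (fun t => (l.drop start').take (j + 1 - start') ++ t)
            (pvReSplit (some ':') (l.drop (j + 1))) := by
      intro start' hs'
      exact IH (l.length - (j + 1)) (by omega) (j + 1) start' (some ':') rfl (by omega) hs'
        (by simp)
    by_cases hjs : j = scan
    · -- empty token or colon right at scan: split unconditionally
      rw [pvLoopA]
      rw [dif_neg he]
      simp only [heint, Int.toNat_natCast]
      rw [if_pos (by simp [hjs])]
      rw [hIH (j + 1) (le_refl _)]
      have hp0 : p = [] := by simp [hpdef, hjs]
      rw [hdecomp, hp0, List.nil_append]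
      have hsplit : pvReSplit prev (':' :: l.drop (j + 1)) =
          [] :: pvReSplit (some ':') (l.drop (j + 1)) := by
        rw [pvReSplit, if_pos (by simp [hprev])]
      rw [hsplit]
      cases hx : pvReSplit (some ':') (l.drop (j + 1)) with
      | nil => exact absurd hx (pvReSplit_ne_nil _ _)
      | cons t ts =>
        simp only [pvHeadMap]
        simp [PySem.Chars.slice_eq_listSlice, PySem.List.slice_natCast, hjs]
    · -- j > scan: look at the character before the colon
      have hjgt : scan < j := by omega
      have hplast : p.getLast? = some (l[j - 1]'(by omega)) := by
        have hlenp : p.length = j - scan := by simp [hpdef]; omega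
        have hne : p ≠ [] := by
          intro h0; rw [h0] at hlenp; simp at hlenp; omega
        rw [List.getLast?_eq_getElem? , hlenp]
        rw [List.getElem?_eq_getElem (by rw [hlenp]; omega : j - scan - 1 < p.length)]
        congr 1
        simp [hpdef, List.getElem_take, List.getElem_drop]
        congr 1
        omega
      have hgetm1 : PySem.List.pyGet? l (pvFindA l scan - 1) = some (l[j - 1]'(by omega)) := by
        rw [heint, show (j : Int) - 1 = ((j - 1 : Nat) : Int) by omega, PySem.List.pyGet?_natCast]
        exact List.getElem?_eq_getElem (by omega)
      rw [heint] at hgetm1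
      rw [pvLoopA]
      rw [dif_neg he]
      simp only [heint, Int.toNat_natCast]
      by_cases hbs : l[j - 1]'(by omega) = '\\'
      · -- escaped colon: A skips, B keeps scanning inside the same token
        rw [if_neg (by
          simp only [hgetm1, hbs, bne_self_eq_false, Bool.or_false, decide_eq_true_eq]
          exact_mod_cast hjs)]
        rw [hIH start (by omega)]
        rw [hdecomp, pvReSplit_append p _ prev hpfree, hplast, hbs]
        simp only [Option.some_or]
        have hstep : pvReSplit (some '\\') (':' :: l.drop (j + 1)) =
            pvConsHd ':' (pvReSplit (some ':') (l.drop (j + 1))) := by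
          rw [pvReSplit, if_neg (by simp)]
        rw [hstep, pvConsHd_eq_headMap _ _ (pvReSplit_ne_nil _ _), pvHeadMap_headMap,
            pvHeadMap_headMap]
        apply pvHeadMap_congr
        intro t
        have hglue : (l.drop start).take (scan - start) ++ p = (l.drop start).take (j - start) := by
          rw [hpdef]
          have := pvSlice_glue l start scan j hstart (by omega)
          convert this using 3 <;> omega
        have htake1 : (l.drop start).take (j + 1 - start) =
            (l.drop start).take (j - start) ++ [':'] := by
          have h5 : (List.drop start l)[j - start]? = some ':' := by
            rw [List.getElem?_drop, show start + (j - start) = j by omega, hcol]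
          rw [show j + 1 - start = (j - start) + 1 by omega, List.take_succ, h5]
          rfl
        rw [← List.append_assoc, hglue, htake1]
        simp
      · -- unescaped colon: both split here
        rw [if_pos (by simp [hgetm1, hbs])]
        rw [hIH (j + 1) (le_refl _)]
        rw [hdecomp, pvReSplit_append p _ prev hpfree, hplast]
        simp only [Option.some_or]
        have hsplit : pvReSplit (some (l[j - 1]'(by omega))) (':' :: l.drop (j + 1)) =
            [] :: pvReSplit (some ':') (l.drop (j + 1)) := by
          rw [pvReSplit, if_pos (by simp [hbs])]
        rw [hsplit]
        cases hx : pvReSplit (some ':') (l.drop (j + 1)) with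
        | nil => exact absurd hx (pvReSplit_ne_nil _ _)
        | cons t ts =>
          simp only [pvHeadMap]
          have hglue : (l.drop start).take (scan - start) ++ p = (l.drop start).take (j - start) := by
            rw [hpdef]
            have := pvSlice_glue l start scan j hstart (by omega)
            convert this using 3 <;> omega
          simp [PySem.Chars.slice_eq_listSlice, PySem.List.slice_natCast, hglue]

-- ===== VERDICT (by name: the statement is the Claim_ definition above) =====
theorem parse_output_line_spec : Claim_equal_parse_output_line := by
  unfold Claim_equal_parse_output_line Spec_parse_output_line
  intro line _
  by_cases hline : line = ""
  · subst hline
    simp [parse_output_line, parse_output_line_alt]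
  · have hne : line.toList ≠ [] := fun h => hline (by
      have := congrArg String.ofList h
      simpa using this)
    have hlen : 0 < line.toList.length := List.length_pos_iff.mpr hne
    unfold parse_output_line parse_output_line_alt
    rw [if_neg hline]
    simp only [hlen, if_pos]
    rw [pvMain line.toList (line.toList.length) 0 0 none rfl (by omega) (le_refl 0) (by simp)]
    simp [pvHeadMap_id]
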